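-- pv_equiv track=rewrite | github.com/jasperanders/EdmondsCoffeeDate | app/helper/helper.py | convert_string_to_nested_list
-- ===== SOURCE A (Python) =====
-- def convert_string_to_nested_list(string_input):
--     baseArray = string_input.splitlines()
--     result = [[]]
--
--     list_counter = 0
--     for i in range(len(baseArray)):
--         if baseArray[i] == "":
--             list_counter += 1
--             result.append([])
--         else:
--             result[list_counter].append(baseArray[i])
--
--     return result
-- ===== SOURCE B (Python) =====
-- def convert_string_to_nested_list(string_input):
--     lines = string_input.splitlines()
--     separators = [i for i, line in enumerate(lines) if line == ""]
--     bounds = [-1] + separators + [len(lines)]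
--     return [lines[b + 1:e] for b, e in zip(bounds, bounds[1:])]
-- ===== Notes on version B (the rewrite author's own statement) =====
-- stated objective: alternative
-- what changed: Replaces A's single accumulate-and-flush loop (mutable result list plus a running list_counter index) with a two-phase pass: first collect the indices of blank lines, then build the result by slicing the line list between consecutive boundaries [-1]+separators+[len].
import Mathlib
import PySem

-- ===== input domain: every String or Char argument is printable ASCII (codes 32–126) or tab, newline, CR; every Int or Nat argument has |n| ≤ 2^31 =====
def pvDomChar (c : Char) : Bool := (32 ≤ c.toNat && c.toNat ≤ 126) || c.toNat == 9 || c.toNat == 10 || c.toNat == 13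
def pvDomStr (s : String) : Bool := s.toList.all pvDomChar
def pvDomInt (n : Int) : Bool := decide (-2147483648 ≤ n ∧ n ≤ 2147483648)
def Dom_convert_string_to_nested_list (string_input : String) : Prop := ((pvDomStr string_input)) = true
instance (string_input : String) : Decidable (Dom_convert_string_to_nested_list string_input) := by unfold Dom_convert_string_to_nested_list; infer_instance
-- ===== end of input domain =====

-- B replaces A's accumulate-and-flush loop with a two-phase pass: collect blank-line indices, then slice between consecutive boundaries (objective: alternative decomposition, same cost).


-- ===== PORT A =====
def convert_string_to_nested_list (string_input : String) : List (List String) :=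
  let baseArray := PySem.Str.splitlines string_input
  -- result = [[]]; list_counter = 0; for i in range(len(baseArray)): …
  let final :=
    (PySem.List.pyRange 0 (PySem.List.len baseArray) 1).foldl
      (fun (st : List (List String) × Nat) i =>
        (fun (st : List (List String) × Nat) (line : String) =>
          if line = "" then (st.1 ++ [[]], st.2 + 1)
          else (st.1.modify st.2 (fun g => g ++ [line]), st.2)) st
          (PySem.List.pyGetD baseArray i ""))
      ([[]], 0)
  final.1

-- ===== PORT B =====
def convert_string_to_nested_list_alt (string_input : String) : List (List String) :=
  let lines := PySem.Str.splitlines string_input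
  -- separators = [i for i, line in enumerate(lines) if line == ""]
  let separators : List Int :=
    ((PySem.List.enumerate lines 0).filter (fun p => p.2 == "")).map (fun p => p.1)
  -- bounds = [-1] + separators + [len(lines)]
  let bounds : List Int := [-1] ++ separators ++ [PySem.List.len lines]
  -- [lines[b + 1:e] for b, e in zip(bounds, bounds[1:])]
  (bounds.zip bounds.tail).map
    (fun p => PySem.List.slice lines (some (p.1 + 1)) (some p.2))

-- ===== PRECONDITION & SPEC =====
def Spec_convert_string_to_nested_list (string_input : String) (out : List (List String)) : Prop := out = convert_string_to_nested_list_alt string_input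
instance (string_input : String) (out : List (List String)) : Decidable (Spec_convert_string_to_nested_list string_input out) := by unfold Spec_convert_string_to_nested_list; infer_instance

-- ===== CLAIM (what is proved, stated in full; the proofs are below) =====
def Claim_equal_convert_string_to_nested_list : Prop := ∀ (string_input : String), Dom_convert_string_to_nested_list string_input → Spec_convert_string_to_nested_list string_input (convert_string_to_nested_list string_input)

-- ===== LEMMAS AND PROOFS =====

-- Reference shape: the grouping both programs compute, by structural recursion.
def pvGroups : List String → List (List String)
  | [] => [[]]
  | l :: rest =>
    if l = "" then [] :: pvGroups rest
    else
      match pvGroups rest with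
      | [] => [[l]]            -- unreachable: pvGroups is never []
      | g :: gs => (l :: g) :: gs

theorem pvGroups_ne_nil (lines : List String) : pvGroups lines ≠ [] := by
  cases lines with
  | nil => simp [pvGroups]
  | cons l rest =>
    simp only [pvGroups]
    split <;> [simp; (cases pvGroups rest <;> simp)]

theorem pvGroups_cons_eq (lines : List String) :
    pvGroups lines = (pvGroups lines).headD [] :: (pvGroups lines).tail := by
  cases h : pvGroups lines with
  | nil => exact absurd h (pvGroups_ne_nil lines)
  | cons g gs => simp

theorem pvGroups_blank (rest : List String) : pvGroups ("" :: rest) = [] :: pvGroups rest := by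
  simp [pvGroups]

theorem pvGroups_nonblank (l : String) (rest : List String) (hl : l ≠ "") :
    pvGroups (l :: rest) = (l :: (pvGroups rest).headD []) :: (pvGroups rest).tail := by
  rw [show pvGroups (l :: rest) = if l = "" then [] :: pvGroups rest else
      match pvGroups rest with
      | [] => [[l]]
      | g :: gs => (l :: g) :: gs from rfl, if_neg hl]
  cases h : pvGroups rest with
  | nil => exact absurd h (pvGroups_ne_nil rest)
  | cons g gs => simp

-- A's loop step
def pvStepA (st : List (List String) × Nat) (line : String) : List (List String) × Nat :=
  if line = "" then (st.1 ++ [[]], st.2 + 1)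
  else (st.1.modify st.2 (fun g => g ++ [line]), st.2)

theorem pvModify_append_singleton (res : List (List String)) (acc : List String)
    (f : List String → List String) :
    (res ++ [acc]).modify res.length f = res ++ [f acc] := by
  induction res with
  | nil => simp [List.modify]
  | cons x t ih => simpa [List.modify] using ih

-- A's fold invariant: it appends into the last list.
theorem pvFoldA (lines : List String) :
    ∀ (res0 : List (List String)) (acc : List String),
      lines.foldl pvStepA (res0 ++ [acc], res0.length) =
        (res0 ++ (acc ++ (pvGroups lines).headD []) :: (pvGroups lines).tail,
         res0.length + (pvGroups lines).tail.length) := by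
  induction lines with
  | nil => intro res0 acc; simp [pvGroups]
  | cons l rest ih =>
    intro res0 acc
    by_cases hl : l = ""
    · subst hl
      have h1 : List.foldl pvStepA (res0 ++ [acc], res0.length) ("" :: rest)
          = List.foldl pvStepA ((res0 ++ [acc]) ++ [[]], (res0 ++ [acc]).length) rest := by
        simp [pvStepA]
      rw [h1, ih, pvGroups_blank]
      simp only [Prod.mk.injEq]
      refine ⟨?_, ?_⟩ <;> conv_rhs => rw [pvGroups_cons_eq rest]
      · simp
      · simp; omega
    · have h1 : List.foldl pvStepA (res0 ++ [acc], res0.length) (l :: rest)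
          = List.foldl pvStepA (res0 ++ [acc ++ [l]], res0.length) rest := by
        simp [pvStepA, hl, pvModify_append_singleton]
      rw [h1, ih, pvGroups_nonblank l rest hl]
      simp

theorem pvA_eq_groups (lines : List String) :
    (lines.foldl pvStepA ([[]], 0)).1 = pvGroups lines := by
  have := pvFoldA lines [] []
  simp only [List.nil_append, List.length_nil] at this
  rw [this]
  exact (pvGroups_cons_eq lines).symm

-- B side: separator indices
def pvSepsFrom (lines : List String) (s : Int) : List Int :=
  ((PySem.List.enumerate lines s).filter (fun p => p.2 == "")).map (fun p => p.1)

theorem pvSepsFrom_cons (l : String) (rest : List String) (s : Int) :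
    pvSepsFrom (l :: rest) s =
      if l = "" then s :: pvSepsFrom rest (s + 1) else pvSepsFrom rest (s + 1) := by
  by_cases hl : l = "" <;> simp [pvSepsFrom, PySem.List.enumerate, hl]

theorem pvSepsFrom_shift (lines : List String) :
    ∀ s : Int, pvSepsFrom lines (s + 1) = (pvSepsFrom lines s).map (fun x => x + 1) := by
  induction lines with
  | nil => intro s; simp [pvSepsFrom, PySem.List.enumerate]
  | cons l rest ih =>
    intro s
    rw [pvSepsFrom_cons, pvSepsFrom_cons, ih (s + 1)]
    by_cases hl : l = "" <;> simp [hl]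

theorem pvSepsFrom_nonneg (lines : List String) :
    ∀ s : Int, 0 ≤ s → ∀ x ∈ pvSepsFrom lines s, 0 ≤ x := by
  induction lines with
  | nil => intro s _ x hx; simp [pvSepsFrom, PySem.List.enumerate] at hx
  | cons l rest ih =>
    intro s hs x hx
    rw [pvSepsFrom_cons] at hx
    by_cases hl : l = ""
    · rw [if_pos hl] at hx
      rcases List.mem_cons.mp hx with rfl | hx
      · exact hs
      · exact ih (s + 1) (by omega) x hx
    · rw [if_neg hl] at hx
      exact ih (s + 1) (by omega) x hx

-- shift lemma for slices on a cons
theorem pvSlice_cons_shift {α : Type} (x : α) (xs : List α) (a b : Int)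
    (ha : 0 ≤ a) (hb : 0 ≤ b) :
    PySem.List.slice (x :: xs) (some (a + 1)) (some (b + 1)) =
      PySem.List.slice xs (some a) (some b) := by
  rw [PySem.List.slice_toNat _ (by omega) (by omega), PySem.List.slice_toNat _ ha hb]
  have h1 : (a + 1).toNat = a.toNat + 1 := by omega
  have h2 : (b + 1).toNat = b.toNat + 1 := by omega
  simp [h1, h2]

theorem pvSlice_cons_head {α : Type} (x : α) (xs : List α) (b : Int) (hb : 0 ≤ b) :
    PySem.List.slice (x :: xs) (some 0) (some (b + 1)) =
      x :: PySem.List.slice xs (some 0) (some b) := by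
  rw [PySem.List.slice_toNat _ le_rfl (by omega), PySem.List.slice_toNat _ le_rfl hb]
  have h2 : (b + 1).toNat = b.toNat + 1 := by omega
  simp [h2]

theorem pvZip_map_shift (u v : List Int) (f : Int × Int → List String) :
    (((u.map (fun x => x + 1)).zip (v.map (fun x => x + 1))).map f) =
      (u.zip v).map (fun p => f (p.1 + 1, p.2 + 1)) := by
  rw [List.zip_map]
  simp [Function.comp_def, Prod.map]

-- B's slicing equals pvGroups
theorem pvB_eq_groups (lines : List String) :
    (((-1 : Int) :: (pvSepsFrom lines 0 ++ [PySem.List.len lines])).zip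
        (pvSepsFrom lines 0 ++ [PySem.List.len lines])).map
      (fun p => PySem.List.slice lines (some (p.1 + 1)) (some p.2)) = pvGroups lines := by
  induction lines with
  | nil => simp [pvSepsFrom, PySem.List.enumerate, pvGroups, PySem.List.len,
      PySem.List.slice_toNat, List.zip]
  | cons l rest ih =>
    have hTnn : ∀ x ∈ pvSepsFrom rest 0 ++ [PySem.List.len rest], 0 ≤ x := by
      intro x hx
      rcases List.mem_append.mp hx with hx | hx
      · exact pvSepsFrom_nonneg rest 0 le_rfl x hx
      · simp only [List.mem_singleton] at hx; subst hx
        simp [PySem.List.len]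
    have hshift : pvSepsFrom rest 1 = (pvSepsFrom rest 0).map (fun x => x + 1) := by
      simpa using pvSepsFrom_shift rest 0
    have hlen : (PySem.List.len (l :: rest) : Int) = PySem.List.len rest + 1 := by
      simp [PySem.List.len]
    cases hT : pvSepsFrom rest 0 ++ [PySem.List.len rest] with
    | nil => exact absurd hT (by simp)
    | cons t0 ts =>
      have ht0 : (0 : Int) ≤ t0 := hTnn t0 (by rw [hT]; exact List.mem_cons_self)
      have htail : ∀ x ∈ ts, 0 ≤ x := fun x hx => hTnn x (by rw [hT]; exact List.mem_cons_of_mem _ hx)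
      by_cases hl : l = ""
      · subst hl
        rw [pvSepsFrom_cons]
        have hite : (if ("" : String) = "" then (0 : Int) :: pvSepsFrom rest (0 + 1)
            else pvSepsFrom rest (0 + 1)) = 0 :: pvSepsFrom rest (0 + 1) := if_pos rfl
        rw [hite]
        simp only [zero_add, hshift, hlen]
        have hTm : (pvSepsFrom rest 0).map (fun x => x + 1) ++ [(PySem.List.len rest : Int) + 1]
            = (pvSepsFrom rest 0 ++ [PySem.List.len rest]).map (fun x => x + 1) := by simp
        rw [pvGroups_blank, ← ih]
        rw [hT] at hTm ⊢
        rw [List.cons_append, hTm]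
        have hkey : (((-1 : Int) :: (0 :: (t0 :: ts).map (fun x => x + 1))).zip
              ((0 : Int) :: (t0 :: ts).map (fun x => x + 1)))
            = ((-1 : Int), (0 : Int)) ::
              ((((-1 : Int) :: t0 :: ts).map (fun x => x + 1)).zip ((t0 :: ts).map (fun x => x + 1))) := by
          simp [List.zip_cons_cons]
        rw [hkey, List.map_cons, pvZip_map_shift]
        have hhead : PySem.List.slice ("" :: rest) (some ((-1 : Int) + 1)) (some (0 : Int)) = [] := by
          rw [show ((-1 : Int) + 1) = 0 from by omega,
            PySem.List.slice_toNat _ le_rfl le_rfl]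
          simp
        rw [hhead]
        refine congrArg _ (List.map_congr_left ?_)
        intro p hp
        obtain ⟨h1, h2⟩ := List.of_mem_zip hp
        have hb : 0 ≤ p.2 := hTnn p.2 (hT ▸ h2)
        have ha : 0 ≤ p.1 + 1 := by
          rcases List.mem_cons.mp h1 with h | h
          · omega
          · have := hTnn p.1 (hT ▸ h); omega
        exact pvSlice_cons_shift "" rest (p.1 + 1) p.2 ha hb
      · rw [pvSepsFrom_cons]
        have hite : (if l = "" then (0 : Int) :: pvSepsFrom rest (0 + 1)
            else pvSepsFrom rest (0 + 1)) = pvSepsFrom rest (0 + 1) := if_neg hl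
        rw [hite]
        simp only [zero_add, hshift, hlen]
        have hTm : (pvSepsFrom rest 0).map (fun x => x + 1) ++ [(PySem.List.len rest : Int) + 1]
            = (t0 :: ts).map (fun x => x + 1) := by rw [← hT]; simp
        rw [hTm, List.map_cons]
        rw [show ((-1 : Int) :: ((t0 + 1) :: ts.map (fun x => x + 1))).zip
              ((t0 + 1) :: ts.map (fun x => x + 1))
            = ((-1 : Int), t0 + 1) ::
              (((t0 :: ts).map (fun x => x + 1)).zip (ts.map (fun x => x + 1))) from by
          simp [List.zip_cons_cons]]
        rw [List.map_cons, pvZip_map_shift]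
        have hhead : PySem.List.slice (l :: rest) (some ((-1 : Int) + 1)) (some (t0 + 1))
            = l :: PySem.List.slice rest (some 0) (some t0) := by
          rw [show ((-1 : Int) + 1) = 0 from by omega]
          exact pvSlice_cons_head l rest t0 ht0
        rw [hhead]
        have htailmap : ((t0 :: ts).zip ts).map
              (fun p => PySem.List.slice (l :: rest) (some (p.1 + 1 + 1)) (some (p.2 + 1)))
            = ((t0 :: ts).zip ts).map
              (fun p => PySem.List.slice rest (some (p.1 + 1)) (some p.2)) := by
          refine List.map_congr_left ?_
          intro p hp
          obtain ⟨h1, h2⟩ := List.of_mem_zip hp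
          have ha : 0 ≤ p.1 := hTnn p.1 (hT ▸ h1)
          have hb : 0 ≤ p.2 := hTnn p.2 (hT ▸ List.mem_cons_of_mem t0 h2)
          exact pvSlice_cons_shift l rest (p.1 + 1) p.2 (by omega) hb
        rw [htailmap, pvGroups_nonblank l rest hl]
        have hih : PySem.List.slice rest (some ((-1 : Int) + 1)) (some t0) ::
              ((t0 :: ts).zip ts).map
                (fun p => PySem.List.slice rest (some (p.1 + 1)) (some p.2))
            = pvGroups rest := by
          rw [← ih, hT]; simp [List.zip_cons_cons]
        rw [← hih]
        simp [show ((-1 : Int) + 1) = 0 from by omega]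


-- ===== VERDICT (by name: the statement is the Claim_ definition above) =====
theorem convert_string_to_nested_list_spec : Claim_equal_convert_string_to_nested_list := by
  intro s _
  show convert_string_to_nested_list s = convert_string_to_nested_list_alt s
  have hA : convert_string_to_nested_list s = pvGroups (PySem.Str.splitlines s) := by
    show ((PySem.List.pyRange 0 (PySem.List.len (PySem.Str.splitlines s)) 1).foldl
        (fun st i => pvStepA st (PySem.List.pyGetD (PySem.Str.splitlines s) i "")) ([[]], 0)).1 = _
    rw [PySem.List.foldl_pyRange_zero_pyGetD (PySem.Str.splitlines s) "" pvStepA ([[]], 0)]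
    exact pvA_eq_groups _
  have hB : convert_string_to_nested_list_alt s = pvGroups (PySem.Str.splitlines s) := by
    show (((-1 : Int) :: (pvSepsFrom (PySem.Str.splitlines s) 0 ++ [PySem.List.len (PySem.Str.splitlines s)])).zip
        (pvSepsFrom (PySem.Str.splitlines s) 0 ++ [PySem.List.len (PySem.Str.splitlines s)])).map
        (fun p => PySem.List.slice (PySem.Str.splitlines s) (some (p.1 + 1)) (some p.2)) = _
    exact pvB_eq_groups _
  rw [hA, hB]
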